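-- pv_equiv track=rewrite | github.com/Paskushka/253503_Detkovsky_9 | IGI/LR3/Lab3IGI/Task5.py | solve_task
-- ===== SOURCE A (Python) =====
-- def solve_task(numbers, max_index):
--     """Function for find Product of negative numbers and sum of positive numbers"""
--     negative_product = 1
--     positive_sum = 0
--     temp = False
--     for i in range(max_index):
--         if numbers[i] < 0:
--             temp = True
--             negative_product *= numbers[i]
--         elif numbers[i] > 0:
--             positive_sum += numbers[i]
--     if not temp:
--         negative_product = 0
--     return negative_product, positive_sum
-- ===== SOURCE B (Python) =====
-- def solve_task(numbers, max_index):
--     """Function for find Product of negative numbers and sum of positive numbers"""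
--     def go(lo, hi):
--         # (optional product of negatives, sum of positives) over numbers[lo:hi], by halving
--         if hi <= lo:
--             return (None, 0)
--         if hi - lo == 1:
--             x = numbers[lo]
--             if x < 0:
--                 return (x, 0)
--             if x > 0:
--                 return (None, x)
--             return (None, 0)
--         mid = (lo + hi) // 2
--         p1, s1 = go(lo, mid)
--         p2, s2 = go(mid, hi)
--         if p1 is None:
--             p = p2
--         elif p2 is None:
--             p = p1
--         else:
--             p = p1 * p2
--         return (p, s1 + s2)
--     p, s = go(0, max_index)
--     return (0 if p is None else p, s)
-- ===== Notes on version B (the rewrite author's own statement) =====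
-- stated objective: alternative
-- what changed: Replaces A's iterative index loop with a mutable flag and two accumulators by structural recursion on the list carrying an Option accumulator: 'no negative seen yet' is the None value of the optional product, combined on the way back up the recursion, so no flag and no index arithmetic exist.
import Mathlib
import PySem

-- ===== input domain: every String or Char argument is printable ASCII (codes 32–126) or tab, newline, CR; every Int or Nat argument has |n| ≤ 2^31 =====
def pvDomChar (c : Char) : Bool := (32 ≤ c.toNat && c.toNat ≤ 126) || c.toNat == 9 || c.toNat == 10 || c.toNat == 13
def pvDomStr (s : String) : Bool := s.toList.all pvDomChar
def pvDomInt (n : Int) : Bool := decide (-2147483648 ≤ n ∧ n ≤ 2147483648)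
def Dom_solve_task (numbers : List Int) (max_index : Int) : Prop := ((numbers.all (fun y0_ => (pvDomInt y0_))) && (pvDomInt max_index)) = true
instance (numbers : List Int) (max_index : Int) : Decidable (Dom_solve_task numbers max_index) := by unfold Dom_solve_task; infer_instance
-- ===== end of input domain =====

-- B replaces A's single index loop with flag+accumulators by a divide-and-conquer recursion combining optional negative-products and positive-sums (alternative, same cost).


-- ===== PORT A =====
-- for i in range(max_index): fused accumulators (negative_product, positive_sum, temp);
-- numbers[i] ported as pyGetD numbers i 0 (in range under Pre_, which excludes the IndexError inputs)
def solve_task (numbers : List Int) (max_index : Int) : Int × Int :=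
  let st := (PySem.List.pyRange 0 max_index 1).foldl
    (fun (st : Int × Int × Bool) i =>
      let v := PySem.List.pyGetD numbers i 0
      if v < 0 then (st.1 * v, st.2.1, true)
      else if v > 0 then (st.1, st.2.1 + v, st.2.2)
      else st) (1, 0, false)
  let negative_product := if st.2.2 = false then 0 else st.1
  (negative_product, st.2.1)

-- ===== PORT B =====
-- go(lo, hi): divide and conquer over numbers[lo:hi]; optional negative product (none = no
-- negative in the range), positive sum, combined from the two halves
def pvGo (numbers : List Int) (lo hi : Int) : Option Int × Int :=
  if _h1 : hi ≤ lo then (none, 0)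
  else if _h2 : hi - lo = 1 then
    let x := PySem.List.pyGetD numbers lo 0
    if x < 0 then (some x, 0)
    else if x > 0 then (none, x)
    else (none, 0)
  else
    let mid := PySem.Int.floordiv (lo + hi) 2
    let r1 := pvGo numbers lo mid
    let r2 := pvGo numbers mid hi
    let p := match r1.1, r2.1 with
      | none, p2 => p2
      | some p1, none => some p1
      | some p1, some p2 => some (p1 * p2)
    (p, r1.2 + r2.2)
termination_by (hi - lo).toNat
decreasing_by
  · have hm : PySem.Int.floordiv (lo + hi) 2 = (lo + hi) / 2 :=
      PySem.Int.floordiv_eq_ediv_of_pos (by norm_num)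
    rw [hm]
    omega
  · have hm : PySem.Int.floordiv (lo + hi) 2 = (lo + hi) / 2 :=
      PySem.Int.floordiv_eq_ediv_of_pos (by norm_num)
    rw [hm]
    omega

def solve_task_alt (numbers : List Int) (max_index : Int) : Int × Int :=
  let r := pvGo numbers 0 max_index
  (r.1.getD 0, r.2)

-- ===== PRECONDITION & SPEC =====
-- Pre_ excludes max_index > len(numbers), on which A raises IndexError at numbers[i]
def Pre_solve_task (numbers : List Int) (max_index : Int) : Prop := max_index ≤ numbers.length
instance (numbers : List Int) (max_index : Int) : Decidable (Pre_solve_task numbers max_index) := by unfold Pre_solve_task; infer_instance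
def pvWitness_solve_task : List Int × Int := ([-2, 3, -4, 5], 3)
def Spec_solve_task (numbers : List Int) (max_index : Int) (out : Int × Int) : Prop := out = solve_task_alt numbers max_index
instance (numbers : List Int) (max_index : Int) (out : Int × Int) : Decidable (Spec_solve_task numbers max_index out) := by unfold Spec_solve_task; infer_instance

-- ===== CLAIM =====
def Claim_equal_solve_task : Prop := ∀ (numbers : List Int) (max_index : Int), Dom_solve_task numbers max_index → Pre_solve_task numbers max_index → Spec_solve_task numbers max_index (solve_task numbers max_index)

-- ===== LEMMAS AND PROOFS =====

lemma pv_mul_foldl (L : List Int) (c : Int) : L.foldl (· * ·) c = c * L.foldl (· * ·) 1 := by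
  induction L generalizing c with
  | nil => simp
  | cons x xs ih =>
    simp only [List.foldl_cons]
    rw [ih (c * x), ih (1 * x)]
    ring

lemma pv_add_foldl (L : List Int) (c : Int) : L.foldl (· + ·) c = c + L.foldl (· + ·) 0 := by
  induction L generalizing c with
  | nil => simp
  | cons x xs ih =>
    simp only [List.foldl_cons]
    rw [ih (c + x), ih (0 + x)]
    ring

-- A's fused step over a value list, characterized by filters
lemma pv_fold_inv (L : List Int) (p s : Int) (t : Bool) :
    L.foldl (fun (st : Int × Int × Bool) v =>
        if v < 0 then (st.1 * v, st.2.1, true)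
        else if v > 0 then (st.1, st.2.1 + v, st.2.2)
        else st) (p, s, t)
    = (p * (L.filter (fun x => x < 0)).foldl (· * ·) 1,
       s + (L.filter (fun x => x > 0)).foldl (· + ·) 0,
       t || !(L.filter (fun x => x < 0)).isEmpty) := by
  induction L generalizing p s t with
  | nil => simp
  | cons x xs ih =>
    simp only [List.foldl_cons, List.filter_cons]
    rcases lt_trichotomy x 0 with h | h | h
    · have h2 : ¬ x > 0 := by omega
      simp only [h, h2, decide_true, decide_false, if_true, if_false, Bool.false_eq_true, ih,
        List.foldl_cons, List.isEmpty_cons, Bool.not_false, Bool.or_true]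
      rw [pv_mul_foldl _ (1 * x)]
      simp only [Prod.mk.injEq]
      exact ⟨by ring, trivial, by simp⟩
    · subst h
      simp only [lt_irrefl, gt_iff_lt, decide_false, if_false, Bool.false_eq_true, ih]
    · have h2 : ¬ x < 0 := by omega
      simp only [h, h2, gt_iff_lt, decide_true, decide_false, if_true, if_false,
        Bool.false_eq_true, ih, List.foldl_cons]
      rw [pv_add_foldl _ (0 + x)]
      simp only [Prod.mk.injEq]
      exact ⟨trivial, by ring, trivial⟩

-- the pair (optional negative product, positive sum) of a value list
def pvSpecPair (L : List Int) : Option Int × Int :=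
  let negs := L.filter (fun x => x < 0)
  ((if negs.isEmpty then none else some (negs.foldl (· * ·) 1)),
   (L.filter (fun x => x > 0)).foldl (· + ·) 0)

-- pvSpecPair is a homomorphism for B's combine step
lemma pv_specPair_append (L1 L2 : List Int) :
    pvSpecPair (L1 ++ L2)
    = ((match (pvSpecPair L1).1, (pvSpecPair L2).1 with
        | none, p2 => p2
        | some p1, none => some p1
        | some p1, some p2 => some (p1 * p2)),
       (pvSpecPair L1).2 + (pvSpecPair L2).2) := by
  unfold pvSpecPair
  simp only [List.filter_append, List.foldl_append, Prod.mk.injEq]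
  refine ⟨?_, ?_⟩
  · set n1 := L1.filter (fun x => decide (x < 0))
    set n2 := L2.filter (fun x => decide (x < 0))
    by_cases e1 : n1.isEmpty
    · have h1 : n1 = [] := List.isEmpty_iff.mp e1
      simp [e1, h1]
    · by_cases e2 : n2.isEmpty
      · have h2 : n2 = [] := List.isEmpty_iff.mp e2
        simp [e1, e2, h2]
      · have hne : (n1 ++ n2).isEmpty = false := by
          cases h : n1 with
          | nil => rw [h] at e1; simp at e1
          | cons a t => simp
        simp only [Bool.not_eq_true] at e1 e2
        simp only [e1, e2, hne, Bool.false_eq_true, if_false]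
        rw [pv_mul_foldl n2]
  · rw [pv_add_foldl (L2.filter (fun x => decide (x > 0)))]

-- B's divide and conquer computes pvSpecPair of the slice (inside the list)
lemma pv_go_inv (numbers : List Int) (n : Nat) (lo hi : Int) (hn : (hi - lo).toNat = n)
    (h0 : 0 ≤ lo) (hlen : hi ≤ numbers.length) :
    pvGo numbers lo hi = pvSpecPair ((numbers.drop lo.toNat).take (hi - lo).toNat) := by
  induction n using Nat.strong_induction_on generalizing lo hi with
  | _ n ih =>
    rw [pvGo]
    by_cases h1 : hi ≤ lo
    · have : (hi - lo).toNat = 0 := by omega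
      simp [h1, this, pvSpecPair]
    · by_cases h2 : hi - lo = 1
      · have ht : (hi - lo).toNat = 1 := by omega
        have hlo : lo.toNat < numbers.length := by omega
        simp only [dif_neg h1, dif_pos h2, ht]
        rw [PySem.List.pyGetD_eq_getElem numbers 0 h0 (by omega)]
        rw [List.take_one, List.head?_drop]
        have hget : numbers[lo.toNat]? = some numbers[lo.toNat] := List.getElem?_eq_getElem hlo
        rw [hget]
        simp only [Option.toList_some]
        rcases lt_trichotomy (numbers[lo.toNat]) 0 with h | h | h
        · have h3 : ¬ (numbers[lo.toNat] > 0) := by omega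
          simp [pvSpecPair, h, h3, List.filter_cons]
        · simp [pvSpecPair, h, List.filter_cons]
        · have h3 : ¬ (numbers[lo.toNat] < 0) := by omega
          simp [pvSpecPair, h, h3, List.filter_cons]
      · set mid := PySem.Int.floordiv (lo + hi) 2 with hmid
        have hmid' : mid = (lo + hi) / 2 := PySem.Int.floordiv_eq_ediv_of_pos (by norm_num)
        have hb1 : lo < mid := by omega
        have hb2 : mid < hi := by omega
        simp only [dif_neg h1, dif_neg h2]
        rw [ih (mid - lo).toNat (by omega) lo mid rfl h0 (by omega),
            ih (hi - mid).toNat (by omega) mid hi rfl (by omega) hlen]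
        have hsplit : (numbers.drop lo.toNat).take (hi - lo).toNat
            = (numbers.drop lo.toNat).take (mid - lo).toNat
              ++ (numbers.drop mid.toNat).take (hi - mid).toNat := by
          have h3 : (hi - lo).toNat = (mid - lo).toNat + (hi - mid).toNat := by omega
          rw [h3, List.take_add, List.drop_drop]
          have h4 : lo.toNat + (mid - lo).toNat = mid.toNat := by omega
          rw [h4]
        rw [hsplit, pv_specPair_append]

-- the indexed values A reads are exactly the prefix (under Pre_)
lemma pv_map_take (xs : List Int) (k : Int) (hk : k ≤ xs.length) :
    (PySem.List.pyRange 0 k 1).map (fun i => PySem.List.pyGetD xs i 0) = xs.take k.toNat := by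
  rw [PySem.List.pyRange_one]
  apply List.ext_getElem
  · simp; omega
  · intro n h1 h2
    simp only [List.getElem_map, List.getElem_range, List.getElem_take]
    have hn : (n : Int) = ((0 : Int) + n) := by simp
    rw [← hn, PySem.List.pyGetD_natCast]
    have : n < xs.length := by simp at h1; omega
    simp [List.getD, this]

-- ===== VERDICT =====
theorem solve_task_spec : Claim_equal_solve_task := by
  intro numbers max_index _ hpre
  unfold Spec_solve_task solve_task solve_task_alt
  rw [← List.foldl_map (f := fun i => PySem.List.pyGetD numbers i 0)
        (g := fun (st : Int × Int × Bool) v =>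
          if v < 0 then (st.1 * v, st.2.1, true)
          else if v > 0 then (st.1, st.2.1 + v, st.2.2)
          else st)]
  rw [pv_map_take numbers max_index hpre, pv_fold_inv,
      pv_go_inv numbers (max_index - 0).toNat 0 max_index rfl (by omega) hpre]
  unfold pvSpecPair
  simp only [Int.toNat_zero, List.drop_zero, Int.sub_zero, Bool.false_or]
  by_cases h : ((numbers.take max_index.toNat).filter (fun x => decide (x < 0))).isEmpty
  · simp [h]
  · simp [h]
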